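-- pv_equiv track=rewrite | github.com/Alpaca-Network/gatewayz-backend | src/services/xai_client.py | is_xai_reasoning_model
-- ===== SOURCE A (Python) =====
-- XAI_REASONING_MODELS = {
--     "grok-3-mini",
--     "grok-3-mini-beta",
--     "grok-4",
--     "grok-4-fast",
--     "grok-4.1-fast",
--     "grok-4-1-fast-reasoning",
--     "grok-4.1-fast-reasoning",
-- }
--
-- XAI_NON_REASONING_MODELS = {
--     "grok-4-1-fast-non-reasoning",
--     "grok-4.1-fast-non-reasoning",
--     "grok-2",
--     "grok-2-1212",
--     "grok-beta",
--     "grok-vision-beta",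
-- }
--
-- def is_xai_reasoning_model(model: str) -> bool:
--     """Check if a model supports reasoning capabilities.
--
--     Args:
--         model: Model name/ID
--
--     Returns:
--         True if the model supports reasoning, False otherwise
--     """
--     model_lower = model.lower()
--     # Extract the base model name (handle prefixed model IDs like "xai/grok-4")
--     base_model = model_lower.split("/")[-1] if "/" in model_lower else model_lower
--
--     # Check if explicitly non-reasoning first (takes precedence)
--     for non_reasoning_model in XAI_NON_REASONING_MODELS:
--         if base_model == non_reasoning_model or base_model.startswith(f"{non_reasoning_model}-"):
--             return False
--
--     # Check explicit reasoning models (exact match or with suffix)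
--     for reasoning_model in XAI_REASONING_MODELS:
--         if base_model == reasoning_model or base_model.startswith(f"{reasoning_model}-"):
--             return True
--
--     # Default: only known grok reasoning models should return True
--     return False
-- ===== SOURCE B (Python) =====
-- XAI_REASONING_MODELS = {
--     "grok-3-mini",
--     "grok-3-mini-beta",
--     "grok-4",
--     "grok-4-fast",
--     "grok-4.1-fast",
--     "grok-4-1-fast-reasoning",
--     "grok-4.1-fast-reasoning",
-- }
--
-- XAI_NON_REASONING_MODELS = {
--     "grok-4-1-fast-non-reasoning",
--     "grok-4.1-fast-non-reasoning",
--     "grok-2",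
--     "grok-2-1212",
--     "grok-beta",
--     "grok-vision-beta",
-- }
--
-- def is_xai_reasoning_model(model: str) -> bool:
--     """Check if a model supports reasoning capabilities.
--
--     Instead of scanning each constant set with startswith, build the set of
--     dash-boundary prefixes of the base model name in one pass and intersect:
--     non-reasoning wins (checked first), then reasoning, else False.
--     """
--     base = model.lower().split("/")[-1]
--     prefixes = {base[:i] for i, ch in enumerate(base) if ch == "-"}
--     prefixes.add(base)
--     if prefixes & XAI_NON_REASONING_MODELS:
--         return False
--     return bool(prefixes & XAI_REASONING_MODELS)
-- ===== Notes on version B (the rewrite author's own statement) =====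
-- stated objective: alternative
-- what changed: Instead of scanning each constant set and testing equality/startswith per model, B builds the set of dash-boundary prefixes of the base name in one pass over its characters and decides by set intersection, non-reasoning set first.
import Mathlib
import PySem

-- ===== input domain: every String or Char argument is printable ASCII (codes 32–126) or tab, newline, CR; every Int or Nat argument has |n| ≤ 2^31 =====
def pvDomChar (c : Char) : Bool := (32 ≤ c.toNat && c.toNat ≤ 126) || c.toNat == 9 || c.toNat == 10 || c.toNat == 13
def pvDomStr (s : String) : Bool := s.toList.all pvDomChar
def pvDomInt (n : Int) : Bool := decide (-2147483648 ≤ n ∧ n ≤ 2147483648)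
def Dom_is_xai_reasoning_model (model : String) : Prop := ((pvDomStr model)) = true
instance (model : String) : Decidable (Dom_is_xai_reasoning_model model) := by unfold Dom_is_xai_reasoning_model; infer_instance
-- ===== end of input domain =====

-- B replaces A's startswith scans over the constant sets by building the set of
-- dash-boundary prefixes of the base name in one pass and intersecting it with the
-- two constant sets (non-reasoning first, preserving A's precedence); objective: alternative.

-- ===== PORT A =====
-- module constants XAI_REASONING_MODELS / XAI_NON_REASONING_MODELS (source order;
-- only any-membership over them is consumed, so set iteration order is irrelevant)
def pvXaiReasoning : List (List Char) :=
  ["grok-3-mini".toList, "grok-3-mini-beta".toList, "grok-4".toList, "grok-4-fast".toList,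
   "grok-4.1-fast".toList, "grok-4-1-fast-reasoning".toList, "grok-4.1-fast-reasoning".toList]

def pvXaiNonReasoning : List (List Char) :=
  ["grok-4-1-fast-non-reasoning".toList, "grok-4.1-fast-non-reasoning".toList, "grok-2".toList,
   "grok-2-1212".toList, "grok-beta".toList, "grok-vision-beta".toList]

def is_xai_reasoning_model (model : String) : Bool :=
  let model_lower := PySem.Chars.lower model.toList
  let base_model := if PySem.Chars.isIn ['/'] model_lower then
      (PySem.List.pyGet? (PySem.Chars.splitOn model_lower ['/']) (-1)).getD []
    else model_lower
  -- for non_reasoning_model in XAI_NON_REASONING_MODELS: ... return False  (loop with early return = any)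
  if pvXaiNonReasoning.any (fun m => base_model == m || PySem.Chars.startswith base_model (m ++ ['-'])) then
    false
  -- for reasoning_model in XAI_REASONING_MODELS: ... return True
  else if pvXaiReasoning.any (fun m => base_model == m || PySem.Chars.startswith base_model (m ++ ['-'])) then
    true
  else false

-- ===== PORT B =====
-- {base[:i] for i, ch in enumerate(base) if ch == "-"} followed by prefixes.add(base);
-- base[:i] with the nonnegative enumerate index i is PySem.List.slice base none (some i) (exact)
def pvPrefixes (base : List Char) : PySem.Set (List Char) :=
  PySem.Set.add
    (PySem.Set.ofList ((PySem.List.enumerate base).filterMap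
      (fun p => if p.2 == '-' then some (PySem.List.slice base none (some p.1)) else none)))
    base

def is_xai_reasoning_model_alt (model : String) : Bool :=
  let base := (PySem.List.pyGet? (PySem.Chars.splitOn (PySem.Chars.lower model.toList) ['/']) (-1)).getD []
  let prefixes := pvPrefixes base
  -- if prefixes & XAI_NON_REASONING_MODELS: return False
  if !(PySem.Set.inter prefixes pvXaiNonReasoning).isEmpty then false
  -- return bool(prefixes & XAI_REASONING_MODELS)
  else !(PySem.Set.inter prefixes pvXaiReasoning).isEmpty

-- ===== PRECONDITION & SPEC =====
def Spec_is_xai_reasoning_model (model : String) (out : Bool) : Prop := out = is_xai_reasoning_model_alt model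
instance (model : String) (out : Bool) : Decidable (Spec_is_xai_reasoning_model model out) := by unfold Spec_is_xai_reasoning_model; infer_instance

-- ===== CLAIM (what is proved, stated in full; the proofs are below) =====
def Claim_equal_is_xai_reasoning_model : Prop := ∀ (model : String), Dom_is_xai_reasoning_model model → Spec_is_xai_reasoning_model model (is_xai_reasoning_model model)

-- ===== LEMMAS AND PROOFS =====

-- splitOn.go never meets the separator when '/' does not occur in the remainder
theorem pv_splitOn_go_no_sep (fuel : Nat) (l cur : List Char) (acc : List (List Char))
    (h : '/' ∉ l) :
    PySem.Chars.splitOn.go ['/'] fuel l cur acc = ((cur.reverse ++ l) :: acc).reverse := by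
  induction fuel generalizing l cur acc with
  | zero => rfl
  | succ fuel ih =>
    cases l with
    | nil => simp [PySem.Chars.splitOn.go]
    | cons c rest =>
      have hc : c ≠ '/' := fun hc => h (by simp [hc])
      have hpre : List.isPrefixOf ['/'] (c :: rest) = false := by
        simp [List.isPrefixOf, hc.symm]
      rw [PySem.Chars.splitOn.go]
      simp only [hpre, Bool.false_eq_true, if_false]
      rw [ih rest (c :: cur) acc (fun hm => h (by simp [hm]))]
      simp

theorem pv_splitOn_no_sep (s : List Char) (h : '/' ∉ s) :
    PySem.Chars.splitOn s ['/'] = [s] := by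
  unfold PySem.Chars.splitOn
  rw [pv_splitOn_go_no_sep _ _ _ _ h]
  simp

-- membership in B's prefix set = A's per-model test
theorem pv_mem_prefixes (b m : List Char) :
    m ∈ pvPrefixes b ↔ b = m ∨ (m ++ ['-']) <+: b := by
  unfold pvPrefixes
  rw [PySem.Set.mem_add, PySem.Set.mem_ofList]
  constructor
  · rintro (hm | rfl)
    · right
      obtain ⟨p, hp, hsome⟩ := List.mem_filterMap.mp hm
      obtain ⟨k, hk, rfl⟩ := (PySem.List.mem_enumerate_iff ..).mp hp
      simp only [beq_iff_eq] at hsome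
      by_cases hdash : b[k] = '-'
      · simp [hdash] at hsome
        subst hsome
        have : b.take k ++ ['-'] = b.take (k + 1) := by
          rw [List.take_add_one, List.getElem?_eq_getElem hk, hdash]
          rfl
        rw [this]
        exact List.take_prefix _ _
      · simp [hdash] at hsome
    · left; rfl
  · rintro (rfl | hpre)
    · right; rfl
    · left
      have hlen : m.length + 1 ≤ b.length := by
        have := hpre.length_le; simpa using this
      have hk : m.length < b.length := by omega
      have htake : (m ++ ['-']) = b.take (m.length + 1) := by
        have := List.prefix_iff_eq_take.mp hpre
        simpa using this
      have hdash : b[m.length] = '-' := by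
        have h1 : (m ++ ['-'])[m.length]'(by simp) = '-' := by
          simp
        have h2 := hpre.getElem (i := m.length) (by simp)
        rw [h1] at h2; exact h2.symm
      have hm : m = b.take m.length := by
        have : m <+: b := (List.prefix_append m ['-']).trans hpre
        have := List.prefix_iff_eq_take.mp this
        simpa using this
      refine List.mem_filterMap.mpr ⟨((0 : Int) + (m.length : Int), b[m.length]), ?_, ?_⟩
      · exact (PySem.List.mem_enumerate_iff ..).mpr ⟨m.length, hk, rfl⟩
      · simp only [hdash, beq_self_eq_true, if_pos]
        rw [show ((0 : Int) + (m.length : Int)) = ((m.length : Nat) : Int) by ring]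
        rw [PySem.List.slice_to_natCast b m.length]
        exact congrArg some hm.symm

-- A's scan over a constant set = nonemptiness of B's intersection with it
theorem pv_any_eq_inter (b : List Char) (S : List (List Char)) :
    S.any (fun m => b == m || PySem.Chars.startswith b (m ++ ['-']))
      = !(PySem.Set.inter (pvPrefixes b) S).isEmpty := by
  rw [Bool.eq_iff_iff]
  simp only [List.any_eq_true, Bool.or_eq_true, beq_iff_eq, PySem.Chars.startswith_iff,
    Bool.not_eq_eq_eq_not, Bool.not_true, List.isEmpty_eq_false_iff_exists_mem]
  constructor
  · rintro ⟨m, hmS, hm⟩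
    exact ⟨m, (PySem.Set.mem_inter ..).mpr ⟨(pv_mem_prefixes b m).mpr (by tauto), hmS⟩⟩
  · rintro ⟨m, hm⟩
    obtain ⟨hmp, hmS⟩ := (PySem.Set.mem_inter ..).mp hm
    exact ⟨m, hmS, by have := (pv_mem_prefixes b m).mp hmp; tauto⟩

-- ===== VERDICT (by name: the statement is the Claim_ definition above) =====
theorem is_xai_reasoning_model_spec : Claim_equal_is_xai_reasoning_model := by
  intro model _
  unfold Spec_is_xai_reasoning_model is_xai_reasoning_model is_xai_reasoning_model_alt
  have hbase : (if PySem.Chars.isIn ['/'] (PySem.Chars.lower model.toList) then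
      (PySem.List.pyGet? (PySem.Chars.splitOn (PySem.Chars.lower model.toList) ['/']) (-1)).getD []
    else PySem.Chars.lower model.toList)
      = (PySem.List.pyGet? (PySem.Chars.splitOn (PySem.Chars.lower model.toList) ['/']) (-1)).getD [] := by
    by_cases h : PySem.Chars.isIn ['/'] (PySem.Chars.lower model.toList) = true
    · rw [if_pos h]
    · rw [if_neg h]
      have hmem : '/' ∉ PySem.Chars.lower model.toList := by
        intro hm
        exact h ((PySem.Chars.isIn_iff_infix ..).mpr ((List.singleton_infix_iff '/' _).mpr hm))
      rw [pv_splitOn_no_sep _ hmem]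
      rfl
  simp only [hbase, pv_any_eq_inter]
  set x := !(PySem.Set.inter (pvPrefixes ((PySem.List.pyGet? (PySem.Chars.splitOn (PySem.Chars.lower model.toList) ['/']) (-1)).getD [])) pvXaiNonReasoning).isEmpty with hx
  set y := !(PySem.Set.inter (pvPrefixes ((PySem.List.pyGet? (PySem.Chars.splitOn (PySem.Chars.lower model.toList) ['/']) (-1)).getD [])) pvXaiReasoning).isEmpty with hy
  cases x <;> cases y <;> rfl
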